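-- pv_equiv track=rewrite | github.com/daniel-reich/turbo-robot | 9fbbjaLt22Zfvjjau_21.py | paul_cipher
-- ===== SOURCE A (Python) =====
-- def paul_cipher(s):
--     w = 'abcdefghijklmnopqrstuvwxyz'
--     result = ''
--     fl = ''
--     for letter in s:
--         if not fl and letter.isalpha():
--             fl = True
--             result+=letter
--             n = w.index(letter.lower())+1
--         elif letter.isalpha():
--             r =  (n+ w.index(letter.lower())+1)
--             result = result + w[(r-26)-1 if r >= 26 else r-1]
--             n = w.index(letter.lower())+1
--         else:
--             result+=letter
--     return result.upper()
-- ===== SOURCE B (Python) =====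
-- def paul_cipher(s):
--     # Pass 1: collect the alphabetic characters.
--     letters = [c for c in s if c.isalpha()]
--     # Pass 2: encode them: first letter -> its own uppercase, each later letter ->
--     # running-sum cipher of the previous letter's position and its own.
--     out = []
--     prev = None
--     for c in letters:
--         pos = ord(c.lower()) - ord('a') + 1
--         if prev is None:
--             out.append(c.upper())
--         else:
--             out.append(chr((prev + pos - 1) % 26 + ord('A')))
--         prev = pos
--     # Pass 3: re-insert the encoded letters at the alphabetic positions.
--     it = iter(out)
--     return ''.join(next(it) if c.isalpha() else c for c in s)
-- ===== Notes on version B (the rewrite author's own statement) =====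
-- stated objective: alternative
-- what changed: A is one fused stateful loop (flag, last position, running string with w.index lookups and a manual r>=26 wrap plus a final .upper()); B is three separate passes: collect the letters, encode them with a closed-form fold taking (prev+pos-1) mod 26 into an uppercase letter, then re-insert them at the alphabetic positions of the original string.
import Mathlib
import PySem

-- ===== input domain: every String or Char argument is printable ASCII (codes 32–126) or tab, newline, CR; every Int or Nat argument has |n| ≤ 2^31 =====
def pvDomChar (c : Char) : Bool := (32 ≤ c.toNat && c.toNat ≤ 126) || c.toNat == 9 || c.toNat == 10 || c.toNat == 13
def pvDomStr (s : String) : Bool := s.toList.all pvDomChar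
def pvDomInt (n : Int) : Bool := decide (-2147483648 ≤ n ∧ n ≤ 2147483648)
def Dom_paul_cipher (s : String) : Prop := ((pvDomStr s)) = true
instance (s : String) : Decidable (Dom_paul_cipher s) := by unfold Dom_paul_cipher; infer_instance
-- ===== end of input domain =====

-- B replaces A's fused stateful loop by three passes (collect letters, encode with a
-- closed-form (prev+pos-1) % 26 fold, re-insert); same O(n) cost, different decomposition.


-- ===== PORT A =====
-- w = 'abcdefghijklmnopqrstuvwxyz'
def pvW : List Char := ['a','b','c','d','e','f','g','h','i','j','k','l','m','n','o','p','q','r','s','t','u','v','w','x','y','z']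

-- one iteration of A's for-loop; state = (result, fl, n).  'w.index(letter.lower())' is ported
-- as '(index? …).getD 0': index? is some whenever letter.isalpha (the only context it is called in),
-- so the default is never taken; likewise w[…] is in range whenever evaluated, so pyGetD's default
-- ' ' is never taken; n starts at an arbitrary 0 exactly as Python's unbound n (read only after fl is set).
def pvStepA (st : List Char × Bool × Int) (letter : Char) : List Char × Bool × Int :=
  match st with
  | (result, fl, n) =>
  if !fl && PySem.Chars.isalpha letter then
    (result ++ [letter], true,
     (((PySem.List.index? pvW (PySem.Chars.lowerChar letter)).getD 0 : Nat) : Int) + 1)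
  else if PySem.Chars.isalpha letter then
    let r : Int := n + (((PySem.List.index? pvW (PySem.Chars.lowerChar letter)).getD 0 : Nat) : Int) + 1
    (result ++ [PySem.List.pyGetD pvW (if 26 ≤ r then (r - 26) - 1 else r - 1) ' '], true,
     (((PySem.List.index? pvW (PySem.Chars.lowerChar letter)).getD 0 : Nat) : Int) + 1)
  else
    (result ++ [letter], fl, n)

def paul_cipher (s : String) : String :=
  String.ofList (PySem.Chars.upper (s.toList.foldl pvStepA ([], false, 0)).1)

-- ===== PORT B =====
-- pos = ord(c.lower()) - ord('a') + 1
def pvPos (c : Char) : Int := ((PySem.Chars.lowerChar c).toNat : Int) - 97 + 1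

-- pass 2, after the first letter (prev is set): chr((prev + pos - 1) % 26 + ord('A'))
def pvEncTail (prev : Int) : List Char → List Char
  | [] => []
  | c :: rest =>
      Char.ofNat ((PySem.Int.mod (prev + pvPos c - 1) 26).toNat + 65) :: pvEncTail (pvPos c) rest

-- pass 2 from the start (prev is None): first letter becomes its own uppercase
def pvEncode : List Char → List Char
  | [] => []
  | c :: rest => PySem.Chars.upperChar c :: pvEncTail (pvPos c) rest

-- pass 3: next(it) at alphabetic positions, the original character elsewhere
-- (the encoded list always has a head at an alphabetic position, so headD's default is never taken)
def pvMerge : List Char → List Char → List Char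
  | [], _ => []
  | c :: rest, e =>
      if PySem.Chars.isalpha c then e.headD 'A' :: pvMerge rest e.tail
      else c :: pvMerge rest e

def paul_cipher_alt (s : String) : String :=
  String.ofList (pvMerge s.toList (pvEncode (s.toList.filter PySem.Chars.isalpha)))

-- ===== PRECONDITION & SPEC =====
def Spec_paul_cipher (s : String) (out : String) : Prop := out = paul_cipher_alt s
instance (s : String) (out : String) : Decidable (Spec_paul_cipher s out) := by unfold Spec_paul_cipher; infer_instance

-- ===== CLAIM (what is proved, stated in full; the proofs are below) =====
def Claim_equal_paul_cipher : Prop := ∀ (s : String), Dom_paul_cipher s → Spec_paul_cipher s (paul_cipher s)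

-- ===== LEMMAS AND PROOFS =====

-- an alphabetic Char is an ASCII letter
lemma pv_alpha_range (c : Char) (h : PySem.Chars.isalpha c = true) :
    (65 ≤ c.toNat ∧ c.toNat ≤ 90) ∨ (97 ≤ c.toNat ∧ c.toNat ≤ 122) := by
  simp only [PySem.Chars.isalpha, PySem.Chars.isupper, PySem.Chars.islower, Char.le_def,
    Bool.or_eq_true, Bool.and_eq_true, decide_eq_true_eq, UInt32.le_iff_toNat_le] at h
  simp only [Char.toNat] at *
  exact h.imp (fun x => ⟨x.1, x.2⟩) (fun x => ⟨x.1, x.2⟩)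

-- A's 'w.index(c.lower()) + 1' is B's position, and it lies in [1, 26]
lemma pv_alpha_facts (c : Char) (h : PySem.Chars.isalpha c = true) :
    (((PySem.List.index? pvW (PySem.Chars.lowerChar c)).getD 0 : Nat) : Int) + 1 = pvPos c
      ∧ 1 ≤ pvPos c ∧ pvPos c ≤ 26 := by
  have hc : Char.ofNat c.toNat = c := Char.ofNat_toNat c
  rw [← hc]
  rcases pv_alpha_range c h with ⟨ha, hb⟩ | ⟨ha, hb⟩ <;> interval_cases (c.toNat) <;> decide

-- the alphabet table at a valid natural index, uppercased
lemma pvW_fact (j : Nat) (hj : j < 26) :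
    PySem.Chars.upperChar (PySem.List.pyGetD pvW ((j : Nat) : Int) ' ') = Char.ofNat (j + 65) := by
  interval_cases j <;> decide

-- upper of a non-letter is itself
lemma pv_upper_nonalpha (c : Char) (h : PySem.Chars.isalpha c = false) :
    PySem.Chars.upperChar c = c := by
  simp only [PySem.Chars.isalpha, Bool.or_eq_false_iff] at h
  simp [PySem.Chars.upperChar, h.2]

-- A's table lookup (with the r ≥ 26 manual wrap, incl. the w[-1] case), uppercased,
-- is B's closed-form cipher character
lemma pv_cipher_char (n p : Int) (h1 : 1 ≤ n) (h2 : n ≤ 26) (h3 : 1 ≤ p) (h4 : p ≤ 26) :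
    PySem.Chars.upperChar
        (PySem.List.pyGetD pvW (if 26 ≤ n + p then (n + p - 26) - 1 else n + p - 1) ' ')
      = Char.ofNat ((PySem.Int.mod (n + p - 1) 26).toNat + 65) := by
  have hm : PySem.Int.mod (n + p - 1) 26 = (n + p - 1) % 26 :=
    PySem.Int.mod_eq_emod_of_pos (by norm_num)
  rw [hm]
  by_cases hr : 26 ≤ n + p
  · rw [if_pos hr]
    by_cases hr2 : n + p = 26
    · have e1 : n + p - 26 - 1 = (-1 : Int) := by omega
      have e2 : ((n + p - 1) % 26).toNat = 25 := by omega
      rw [e1, e2]; decide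
    · have hj : (n + p - 27).toNat < 26 := by omega
      have e1 : n + p - 26 - 1 = (((n + p - 27).toNat : Nat) : Int) := by omega
      have e2 : ((n + p - 1) % 26).toNat = (n + p - 27).toNat := by omega
      rw [e1, e2]
      exact pvW_fact _ hj
  · rw [if_neg hr]
    have hj : (n + p - 1).toNat < 26 := by omega
    have e1 : n + p - 1 = (((n + p - 1).toNat : Nat) : Int) := by omega
    have e2 : ((n + p - 1) % 26).toNat = (n + p - 1).toNat := by omega
    rw [e2]
    rw [e1]
    exact pvW_fact _ hj

-- phase 2 of A's loop (fl already true, n = position of the previous letter)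
lemma pv_tail_eq (l : List Char) : ∀ (res : List Char) (n : Int), 1 ≤ n → n ≤ 26 →
    PySem.Chars.upper (l.foldl pvStepA (res, true, n)).1
      = PySem.Chars.upper res ++ pvMerge l (pvEncTail n (l.filter PySem.Chars.isalpha)) := by
  induction l with
  | nil => intro res n _ _; simp [pvMerge]
  | cons c rest ih =>
    intro res n hn1 hn2
    by_cases h : PySem.Chars.isalpha c = true
    · obtain ⟨hpos, hp1, hp2⟩ := pv_alpha_facts c h
      set k : Int := (((PySem.List.index? pvW (PySem.Chars.lowerChar c)).getD 0 : Nat) : Int) with hk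
      simp only [List.foldl_cons]
      have hstep : pvStepA (res, true, n) c =
          (res ++ [PySem.List.pyGetD pvW
              (if 26 ≤ n + k + 1 then (n + k + 1 - 26) - 1 else n + k + 1 - 1) ' '], true, k + 1) := by
        simp [pvStepA, h, hk]
      rw [hstep, hpos, show n + k + 1 = n + pvPos c by omega]
      rw [ih _ (pvPos c) hp1 hp2]
      rw [List.filter_cons_of_pos h]
      simp only [pvEncTail, pvMerge, h, if_true, List.headD_cons, List.tail_cons,
        PySem.Chars.upper, List.map_append, List.map_cons, List.map_nil, List.append_assoc,
        List.singleton_append]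
      rw [pv_cipher_char n (pvPos c) hn1 hn2 hp1 hp2]
    · have hb : PySem.Chars.isalpha c = false := by simpa using h
      simp only [List.foldl_cons]
      have hstep : pvStepA (res, true, n) c = (res ++ [c], true, n) := by
        simp [pvStepA, hb]
      rw [hstep, ih _ n hn1 hn2, List.filter_cons_of_neg (by simp [hb])]
      simp [pvMerge, hb, PySem.Chars.upper, pv_upper_nonalpha c hb]

-- phase 1 of A's loop (fl still false; n unread)
lemma pv_head_eq (l : List Char) : ∀ (res : List Char) (n : Int),
    PySem.Chars.upper (l.foldl pvStepA (res, false, n)).1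
      = PySem.Chars.upper res ++ pvMerge l (pvEncode (l.filter PySem.Chars.isalpha)) := by
  induction l with
  | nil => intro res n; simp [pvMerge]
  | cons c rest ih =>
    intro res n
    by_cases h : PySem.Chars.isalpha c = true
    · obtain ⟨hpos, hp1, hp2⟩ := pv_alpha_facts c h
      set k : Int := (((PySem.List.index? pvW (PySem.Chars.lowerChar c)).getD 0 : Nat) : Int) with hk
      simp only [List.foldl_cons]
      have hstep : pvStepA (res, false, n) c = (res ++ [c], true, k + 1) := by
        simp [pvStepA, h, hk]
      rw [hstep, hpos, pv_tail_eq rest _ (pvPos c) hp1 hp2, List.filter_cons_of_pos h]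
      simp only [pvEncode, pvMerge, h, if_true, List.headD_cons, List.tail_cons,
        PySem.Chars.upper, List.map_append, List.map_cons, List.map_nil, List.append_assoc,
        List.singleton_append]
    · have hb : PySem.Chars.isalpha c = false := by simpa using h
      simp only [List.foldl_cons]
      have hstep : pvStepA (res, false, n) c = (res ++ [c], false, n) := by
        simp [pvStepA, hb]
      rw [hstep, ih _ n, List.filter_cons_of_neg (by simp [hb])]
      simp [pvMerge, hb, PySem.Chars.upper, pv_upper_nonalpha c hb]

-- ===== VERDICT (by name: the statement is the Claim_ definition above) =====
theorem paul_cipher_spec : Claim_equal_paul_cipher := by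
  intro s _
  unfold Spec_paul_cipher paul_cipher paul_cipher_alt
  rw [pv_head_eq s.toList [] 0]
  simp [PySem.Chars.upper]
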